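-- pv_equiv track=rewrite | github.com/YirenZzz/CSC384 | othello/agent_competition.py | compute_edge
-- ===== SOURCE A (Python) =====
-- def compute_edge(board, color):
--     edge_count=0
--     frontier_count=0
--     for i in range(2, len(board)-2):
--         for j in range(2, len(board)-2):
--             if board[0][i]==color or board[i][0]==color or board[-1][i]==color or board[i][-1]==color:
--                 edge_count+=1
--             else:
--                 if (board[i-1][j]==color or board[i+1][j] == color
--                     or board[i][j+1] == color or board[i][j-1] == color):
--                     frontier_count -= 1
--
--     return edge_count, frontier_count
-- ===== SOURCE B (Python) =====
-- def compute_edge(board, color):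
--     n = len(board)
--     idx = range(2, n - 2)
--     # first pass: which rows fail the border test (read border cells only)
--     non_edge = [i for i in idx
--                 if not (board[0][i] == color or board[i][0] == color
--                         or board[-1][i] == color or board[i][-1] == color)]
--     edge_count = (len(idx) - len(non_edge)) * len(idx)
--     # second pass, column-major: count frontier hits of the non-edge rows
--     hits = 0
--     for j in idx:
--         for i in non_edge:
--             if (board[i - 1][j] == color or board[i + 1][j] == color
--                     or board[i][j + 1] == color or board[i][j - 1] == color):
--                 hits += 1
--     return edge_count, -hits
-- ===== Notes on version B (the rewrite author's own statement) =====
-- stated objective: alternative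
-- what changed: B splits the work into two staged passes instead of A's single interleaved double loop: a border-only pass filters the non-edge rows and yields edge_count by arithmetic ((#edge rows) * row width), then a column-major pass (j outer, i inner, over non-edge rows only) counts the frontier hits, negated at the end.
-- outside the precondition, e.g. on compute_edge([[1, 1, 1], [0], [0], [0], [0]], 1): A returns (1, 0), B returns (1, 0)
import Mathlib
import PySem

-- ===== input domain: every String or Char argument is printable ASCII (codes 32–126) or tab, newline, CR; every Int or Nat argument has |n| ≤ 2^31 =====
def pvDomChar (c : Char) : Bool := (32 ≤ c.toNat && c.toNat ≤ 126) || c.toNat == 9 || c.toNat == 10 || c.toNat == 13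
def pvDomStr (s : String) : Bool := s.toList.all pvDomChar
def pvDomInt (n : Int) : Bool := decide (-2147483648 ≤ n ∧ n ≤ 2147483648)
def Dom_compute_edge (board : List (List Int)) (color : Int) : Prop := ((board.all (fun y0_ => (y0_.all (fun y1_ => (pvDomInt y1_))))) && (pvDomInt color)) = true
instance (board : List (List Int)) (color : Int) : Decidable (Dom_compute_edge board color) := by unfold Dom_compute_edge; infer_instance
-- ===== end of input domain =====

-- B restructures A's single interleaved double loop into two staged passes: a
-- border-only pass filtering the non-edge rows (edge_count by arithmetic) and a
-- column-major pass counting the frontier hits of the non-edge rows (alternative).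


-- shared total cell access board[i][j]: under Pre_ every access is in range, so the
-- defaults are never used (exact there; Python's IndexError cases are excluded by Pre_)
def pvCell (board : List (List Int)) (i j : Int) : Int :=
  (PySem.List.pyGet? ((PySem.List.pyGet? board i).getD []) j).getD 0

-- ===== PORT A =====
def compute_edge (board : List (List Int)) (color : Int) : Int × Int :=
  (PySem.List.pyRange 2 ((board.length : Int) - 2) 1).foldl (fun st i =>
    (PySem.List.pyRange 2 ((board.length : Int) - 2) 1).foldl (fun st2 j =>
      if pvCell board 0 i = color ∨ pvCell board i 0 = color ∨
         pvCell board (-1) i = color ∨ pvCell board i (-1) = color then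
        (st2.1 + 1, st2.2)
      else
        if pvCell board (i - 1) j = color ∨ pvCell board (i + 1) j = color ∨
           pvCell board i (j + 1) = color ∨ pvCell board i (j - 1) = color then
          (st2.1, st2.2 - 1)
        else st2) st) (0, 0)

-- ===== PORT B =====
def compute_edge_alt (board : List (List Int)) (color : Int) : Int × Int :=
  let idx := PySem.List.pyRange 2 ((board.length : Int) - 2) 1
  let non_edge := idx.filter (fun i =>
    !(decide (pvCell board 0 i = color ∨ pvCell board i 0 = color ∨
              pvCell board (-1) i = color ∨ pvCell board i (-1) = color)))
  let edge_count : Int := ((idx.length : Int) - (non_edge.length : Int)) * (idx.length : Int)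
  let hits : Int := idx.foldl (fun h j =>
    non_edge.foldl (fun h2 i =>
      if pvCell board (i - 1) j = color ∨ pvCell board (i + 1) j = color ∨
         pvCell board i (j + 1) = color ∨ pvCell board i (j - 1) = color then
        h2 + 1
      else h2) h) 0
  (edge_count, -hits)

-- ===== PRECONDITION & SPEC =====
-- Pre_ excludes ragged boards containing a row shorter than len(board)-1 (with more
-- than 4 rows): there whether A raises IndexError depends on short-circuit evaluation
-- of the edge test, and it may still return on some such boards (see cites).
def Pre_compute_edge (board : List (List Int)) (color : Int) : Prop :=
  (board.length : Int) ≤ 4 ∨ ∀ row ∈ board, (board.length : Int) - 1 ≤ (row.length : Int)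
instance (board : List (List Int)) (color : Int) : Decidable (Pre_compute_edge board color) := by unfold Pre_compute_edge; infer_instance

def pvWitness_compute_edge : List (List Int) × Int :=
  ([[0,1,0,0,0],[0,0,0,0,0],[0,0,0,0,0],[0,0,1,0,0],[0,0,0,0,0]], 1)

def Spec_compute_edge (board : List (List Int)) (color : Int) (out : Int × Int) : Prop := out = compute_edge_alt board color
instance (board : List (List Int)) (color : Int) (out : Int × Int) : Decidable (Spec_compute_edge board color out) := by unfold Spec_compute_edge; infer_instance

-- ===== CLAIM (what is proved, stated in full; the proofs are below) =====
def Claim_equal_compute_edge : Prop := ∀ (board : List (List Int)) (color : Int), Dom_compute_edge board color → Pre_compute_edge board color → Spec_compute_edge board color (compute_edge board color)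

-- ===== LEMMAS AND PROOFS =====

-- A's inner loop, with the edge test constant over the whole pass:
-- if it holds the pass adds the list length to the first component,
-- otherwise it subtracts the count of frontier hits from the second.
theorem pvInner_true {E : Prop} [Decidable E] (hE : E) (F : Int → Prop) [DecidablePred F]
    (L : List Int) (st : Int × Int) :
    L.foldl (fun st2 j => if E then (st2.1 + 1, st2.2)
      else if F j then (st2.1, st2.2 - 1) else st2) st
      = (st.1 + L.length, st.2) := by
  induction L generalizing st with
  | nil => simp
  | cons a L ih =>
      rw [List.foldl_cons, ih, if_pos hE]
      simp only [List.length_cons, Prod.mk.injEq]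
      exact ⟨by push_cast; ring, trivial⟩

theorem pvInner_false {E : Prop} [Decidable E] (hE : ¬ E) (F : Int → Prop) [DecidablePred F]
    (L : List Int) (st : Int × Int) :
    L.foldl (fun st2 j => if E then (st2.1 + 1, st2.2)
      else if F j then (st2.1, st2.2 - 1) else st2) st
      = (st.1, st.2 - (L.countP (fun j => decide (F j)) : Int)) := by
  induction L generalizing st with
  | nil => simp
  | cons a L ih =>
      rw [List.foldl_cons, ih, if_neg hE, List.countP_cons]
      by_cases h : F a <;> simp [h] <;> push_cast <;> omega

-- A's outer loop in closed form: width per edge row, minus the per-row frontier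
-- counts of the non-edge rows.
theorem pvFoldA (E : Int → Prop) [DecidablePred E] (c : Int → Int) (w : Int)
    (L : List Int) (st : Int × Int) :
    L.foldl (fun st i => if E i then (st.1 + w, st.2) else (st.1, st.2 - c i)) st
      = (st.1 + w * (L.countP (fun i => decide (E i)) : Int),
         st.2 - ((L.filter (fun i => !decide (E i))).map c).sum) := by
  induction L generalizing st with
  | nil => simp
  | cons a L ih =>
      rw [List.foldl_cons, ih, List.countP_cons, List.filter_cons]
      by_cases h : E a <;> simp [h] <;> ring

-- B's inner loop counts frontier hits of one column.
theorem pvCountFold (F : Int → Prop) [DecidablePred F] (L : List Int) (h : Int) :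
    L.foldl (fun h2 i => if F i then h2 + 1 else h2) h
      = h + (L.countP (fun i => decide (F i)) : Int) := by
  induction L generalizing h with
  | nil => simp
  | cons a L ih =>
      rw [List.foldl_cons, ih, List.countP_cons]
      by_cases hF : F a <;> simp [hF] <;> push_cast <;> ring

-- countP as an indicator sum over Int.
theorem pvCountP_sum (p : Int → Bool) (L : List Int) :
    (L.countP p : Int) = (L.map (fun x => if p x then (1 : Int) else 0)).sum := by
  induction L with
  | nil => simp
  | cons a L ih =>
      rw [List.countP_cons, List.map_cons, List.sum_cons, ← ih]
      by_cases h : p a <;> simp [h] <;> push_cast <;> ring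

theorem pvSumMapAdd (f g : Int → Int) (L : List Int) :
    (L.map f).sum + (L.map g).sum = (L.map (fun b => f b + g b)).sum := by
  induction L with
  | nil => simp
  | cons a L ih => simp only [List.map_cons, List.sum_cons, ← ih]; ring

-- exchange of a double sum over two lists.
theorem pvSumSwap (g : Int → Int → Int) (L1 L2 : List Int) :
    (L1.map (fun a => (L2.map (fun b => g a b)).sum)).sum
      = (L2.map (fun b => (L1.map (fun a => g a b)).sum)).sum := by
  induction L1 with
  | nil => simp
  | cons a L1 ih =>
      simp only [List.map_cons, List.sum_cons, ih, ← pvSumMapAdd]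

theorem pvCountNot (p : Int → Bool) (L : List Int) :
    (L.countP p : Int) = (L.length : Int) - ((L.filter (fun x => !p x)).length : Int) := by
  induction L with
  | nil => simp
  | cons a L ih =>
      by_cases h : p a = true <;>
        simp only [List.countP_cons, List.filter_cons, h, Bool.not_true, Bool.not_false,
          if_true, if_false, List.length_cons, ih] <;> push_cast <;> omega

-- the whole equivalence, for generic edge test E and frontier test F over one list L:
-- A's interleaved double loop equals B's two staged passes.
theorem pvMain (E : Int → Prop) [DecidablePred E] (F : Int → Int → Prop)
    [∀ i, DecidablePred (F i)] (L : List Int) :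
    L.foldl (fun st i => L.foldl (fun st2 j =>
        if E i then (st2.1 + 1, st2.2)
        else if F i j then (st2.1, st2.2 - 1) else st2) st) ((0 : Int), (0 : Int))
    = (((L.length : Int) - ((L.filter (fun i => !decide (E i))).length : Int)) * (L.length : Int),
       -(L.foldl (fun h j => (L.filter (fun i => !decide (E i))).foldl
           (fun h2 i => if F i j then h2 + 1 else h2) h) (0 : Int))) := by
  have h1 : L.foldl (fun st i => L.foldl (fun st2 j =>
        if E i then (st2.1 + 1, st2.2)
        else if F i j then (st2.1, st2.2 - 1) else st2) st) ((0 : Int), (0 : Int))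
      = L.foldl (fun st i => if E i then (st.1 + (L.length : Int), st.2)
          else (st.1, st.2 - (L.countP (fun j => decide (F i j)) : Int))) ((0 : Int), (0 : Int)) := by
    apply PySem.List.foldl_congr_mem
    intro st i _
    by_cases hE : E i
    · rw [pvInner_true hE (F i), if_pos hE]
    · rw [pvInner_false hE (F i), if_neg hE]
  have h2 : L.foldl (fun h j => (L.filter (fun i => !decide (E i))).foldl
        (fun h2 i => if F i j then h2 + 1 else h2) h) (0 : Int)
      = (L.map (fun j =>
          ((L.filter (fun i => !decide (E i))).countP (fun i => decide (F i j)) : Int))).sum := by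
    have hc : L.foldl (fun h j => (L.filter (fun i => !decide (E i))).foldl
          (fun h2 i => if F i j then h2 + 1 else h2) h) (0 : Int)
        = L.foldl (fun h j => h +
            ((L.filter (fun i => !decide (E i))).countP (fun i => decide (F i j)) : Int)) (0 : Int) := by
      apply PySem.List.foldl_congr_mem
      intro h j _
      exact pvCountFold (fun i => F i j) _ h
    rw [hc, PySem.List.foldl_add]
    simp
  rw [h1, pvFoldA E (fun i => (L.countP (fun j => decide (F i j)) : Int)) ((L.length : Int)) L, h2]
  simp only [Prod.mk.injEq]
  constructor
  · rw [pvCountNot (fun i => decide (E i)) L]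
    ring
  · simp only [pvCountP_sum]
    rw [pvSumSwap (fun i j => if decide (F i j) then (1 : Int) else 0)
      (L.filter (fun i => !decide (E i))) L]
    ring

theorem compute_edge_eq (board : List (List Int)) (color : Int) :
    compute_edge board color = compute_edge_alt board color := by
  unfold compute_edge compute_edge_alt
  dsimp only
  exact pvMain
    (fun i => pvCell board 0 i = color ∨ pvCell board i 0 = color ∨
      pvCell board (-1) i = color ∨ pvCell board i (-1) = color)
    (fun i j => pvCell board (i - 1) j = color ∨ pvCell board (i + 1) j = color ∨
      pvCell board i (j + 1) = color ∨ pvCell board i (j - 1) = color)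
    (PySem.List.pyRange 2 ((board.length : Int) - 2) 1)

-- ===== VERDICT (by name: the statement is the Claim_ definition above) =====
theorem compute_edge_spec : Claim_equal_compute_edge := by
  intro board color _ _
  unfold Spec_compute_edge
  exact compute_edge_eq board color
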